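-- pv_equiv track=rewrite | github.com/tiagoslucas/ThinkTwice | challenge37/main.py | matchArr
-- ===== SOURCE A (Python) =====
-- def matchArr(vals, arr, l):
-- 	for v in vals:
-- 		isValid = False
-- 		for i in range(0, len(arr)):
-- 			for j in range(i+1, len(arr)):
-- 				if arr[j] - arr[i] == v:
-- 					isValid = True
-- 					break
-- 			if isValid:
-- 				break
-- 		if not isValid:
-- 			return False
-- 	return True
-- ===== SOURCE B (Python) =====
-- def matchArr(vals, arr, l):
-- 	diffs = {arr[j] - arr[i] for i in range(0, len(arr)) for j in range(i + 1, len(arr))}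
-- 	return all(v in diffs for v in vals)
-- ===== Notes on version B (the rewrite author's own statement) =====
-- stated objective: faster
-- what changed: B precomputes the set of all pairwise differences of arr once and then answers each value with an O(1) set-membership test, instead of rescanning all pairs for every value.
import Mathlib
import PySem

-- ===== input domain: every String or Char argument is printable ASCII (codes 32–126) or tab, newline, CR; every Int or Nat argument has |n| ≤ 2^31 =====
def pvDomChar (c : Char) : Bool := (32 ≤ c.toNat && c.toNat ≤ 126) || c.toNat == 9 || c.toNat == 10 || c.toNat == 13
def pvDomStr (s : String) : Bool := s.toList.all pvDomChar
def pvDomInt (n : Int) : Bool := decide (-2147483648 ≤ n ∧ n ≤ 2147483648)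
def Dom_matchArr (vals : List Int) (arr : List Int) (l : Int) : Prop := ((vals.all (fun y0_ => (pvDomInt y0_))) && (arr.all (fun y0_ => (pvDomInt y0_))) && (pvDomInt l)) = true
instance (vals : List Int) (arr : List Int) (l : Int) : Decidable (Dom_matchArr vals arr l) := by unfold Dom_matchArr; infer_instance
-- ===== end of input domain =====

-- B precomputes the set of all pairwise differences of arr once and checks each value by set membership (asymptotically faster than A's rescan per value).


-- ===== PORT A =====
-- A's inner double loop over i<j with the break flag isValid
def pvAInner (arr : List Int) (v : Int) : Bool :=
  (PySem.List.pyRange 0 arr.length 1).foldl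
    (fun isValid i =>
      if isValid then isValid
      else (PySem.List.pyRange (i + 1) arr.length 1).foldl
        (fun fl j =>
          if fl then fl
          else decide (PySem.List.pyGetD arr j 0 - PySem.List.pyGetD arr i 0 = v))
        isValid)
    false

-- A's outer loop: early 'return False' when one value has no matching pair
def pvALoop (arr : List Int) : List Int → Bool
  | [] => true
  | v :: rest => if pvAInner arr v then pvALoop arr rest else false

def matchArr (vals : List Int) (arr : List Int) (l : Int) : Bool :=
  pvALoop arr vals

-- ===== PORT B =====
-- B's set comprehension: {arr[j]-arr[i] for i in range(len(arr)) for j in range(i+1,len(arr))}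
def pvDiffs (arr : List Int) : PySem.Set Int :=
  (PySem.List.pyRange 0 arr.length 1).foldl
    (fun s i =>
      (PySem.List.pyRange (i + 1) arr.length 1).foldl
        (fun s j => PySem.Set.add s (PySem.List.pyGetD arr j 0 - PySem.List.pyGetD arr i 0))
        s)
    PySem.Set.empty

def matchArr_alt (vals : List Int) (arr : List Int) (l : Int) : Bool :=
  vals.all (fun v => PySem.Set.contains (pvDiffs arr) v)

-- ===== PRECONDITION & SPEC =====
def Spec_matchArr (vals : List Int) (arr : List Int) (l : Int) (out : Bool) : Prop := out = matchArr_alt vals arr l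
instance (vals : List Int) (arr : List Int) (l : Int) (out : Bool) : Decidable (Spec_matchArr vals arr l out) := by unfold Spec_matchArr; infer_instance

-- ===== CLAIM (what is proved, stated in full; the proofs are below) =====
def Claim_equal_matchArr : Prop := ∀ (vals : List Int) (arr : List Int) (l : Int), Dom_matchArr vals arr l → Spec_matchArr vals arr l (matchArr vals arr l)

-- ===== LEMMAS AND PROOFS =====

-- a fold that only turns the flag on equals '||' of an any
theorem pvFoldFlag {α : Type} (L : List α) (p : α → Bool) (b : Bool) :
    L.foldl (fun fl x => if fl then fl else p x) b = (b || L.any p) := by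
  induction L generalizing b with
  | nil => simp
  | cons x xs ih =>
    cases b <;> simp [List.foldl_cons, ih]

theorem pvAInner_any (arr : List Int) (v : Int) :
    pvAInner arr v =
      (PySem.List.pyRange 0 arr.length 1).any (fun i =>
        (PySem.List.pyRange (i + 1) arr.length 1).any (fun j =>
          decide (PySem.List.pyGetD arr j 0 - PySem.List.pyGetD arr i 0 = v))) := by
  unfold pvAInner
  rw [show (fun (isValid : Bool) (i : Int) =>
      if isValid then isValid
      else (PySem.List.pyRange (i + 1) arr.length 1).foldl
        (fun fl j =>
          if fl then fl
          else decide (PySem.List.pyGetD arr j 0 - PySem.List.pyGetD arr i 0 = v))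
        isValid)
    = (fun (isValid : Bool) (i : Int) =>
      if isValid then isValid
      else (PySem.List.pyRange (i + 1) arr.length 1).any (fun j =>
          decide (PySem.List.pyGetD arr j 0 - PySem.List.pyGetD arr i 0 = v)))
    from by
      funext fl i
      cases fl with
      | true => rfl
      | false => simp [pvFoldFlag]]
  simp [pvFoldFlag]

theorem pvMem_fold (arr : List Int) (v : Int) (L : List Int) (s₀ : PySem.Set Int) :
    (v ∈ L.foldl
      (fun s i =>
        (PySem.List.pyRange (i + 1) arr.length 1).foldl
          (fun s j => PySem.Set.add s (PySem.List.pyGetD arr j 0 - PySem.List.pyGetD arr i 0))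
          s)
      s₀) ↔
      v ∈ s₀ ∨ ∃ i ∈ L, ∃ j ∈ PySem.List.pyRange (i + 1) arr.length 1,
          v = PySem.List.pyGetD arr j 0 - PySem.List.pyGetD arr i 0 := by
  induction L generalizing s₀ with
  | nil => simp
  | cons i rest ih =>
    simp only [List.foldl_cons]
    rw [ih]
    rw [PySem.Set.mem_foldl_add]
    constructor
    · rintro ((h | ⟨j, hj, hv⟩) | ⟨i', hi', j, hj, hv⟩)
      · exact Or.inl h
      · exact Or.inr ⟨i, by simp, j, hj, hv⟩
      · exact Or.inr ⟨i', by simp [hi'], j, hj, hv⟩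
    · rintro (h | ⟨i', hi', j, hj, hv⟩)
      · exact Or.inl (Or.inl h)
      · rcases List.mem_cons.mp hi' with rfl | hi'
        · exact Or.inl (Or.inr ⟨j, hj, hv⟩)
        · exact Or.inr ⟨i', hi', j, hj, hv⟩

theorem pvMem_diffs (arr : List Int) (v : Int) :
    v ∈ pvDiffs arr ↔
      ∃ i ∈ PySem.List.pyRange 0 arr.length 1,
        ∃ j ∈ PySem.List.pyRange (i + 1) arr.length 1,
          v = PySem.List.pyGetD arr j 0 - PySem.List.pyGetD arr i 0 := by
  unfold pvDiffs
  rw [pvMem_fold]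
  simp [PySem.Set.empty]

theorem pvPointwise (arr : List Int) (v : Int) :
    PySem.Set.contains (pvDiffs arr) v = pvAInner arr v := by
  rw [pvAInner_any]
  rcases Bool.eq_false_or_eq_true (PySem.Set.contains (pvDiffs arr) v) with h | h <;> rw [h]
  · symm
    rw [PySem.Set.contains_iff, pvMem_diffs] at h
    rcases h with ⟨i, hi, j, hj, hv⟩
    simp only [List.any_eq_true, decide_eq_true_eq]
    exact ⟨i, hi, j, hj, hv.symm⟩
  · rw [Bool.eq_false_iff] at h
    symm
    rw [Bool.eq_false_iff]
    intro hany
    apply h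
    rw [PySem.Set.contains_iff, pvMem_diffs]
    simp only [List.any_eq_true, decide_eq_true_eq] at hany
    rcases hany with ⟨i, hi, j, hj, hv⟩
    exact ⟨i, hi, j, hj, hv.symm⟩

-- ===== VERDICT (by name: the statement is the Claim_ definition above) =====
theorem matchArr_spec : Claim_equal_matchArr := by
  intro vals arr l hd
  clear hd
  unfold Spec_matchArr matchArr matchArr_alt
  induction vals with
  | nil => rfl
  | cons v rest ih =>
    simp only [pvALoop, List.all_cons, pvPointwise arr v]
    cases pvAInner arr v with
    | true => simpa using ih
    | false => simp
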